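-- pv_equiv track=rewrite | github.com/Virus-Axel/godot-solana-sdk | docs/xml_to_header.py | add_refs_to_description
-- ===== SOURCE A (Python) =====
-- def add_refs_to_description(text: str) -> str:
--     """ Add reference in Godot docs to custom classes.
--
--     The references will appear as clickable links in the final documentation in Godot.
--     This function only replaces class names with links for a limited set of classes.
--
--     Args:
--         text (str): Text of Godot documentation to add references to.
--
--     Returns:
--         str: Updated version of Godot documentation.
--     """
--     TYPES_TO_REF = [
--         "Pubkey",
--         "Variant",
--         "Resource"
--     ]
--     for ref in TYPES_TO_REF:
--         text = text.replace(f' {ref}', f' [{ref}]')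
--
--     return text
-- ===== SOURCE B (Python) =====
-- def add_refs_to_description(text: str) -> str:
--     """Single left-to-right scan: after each space, check the three known
--     class names once and bracket the match, instead of three full replace
--     passes over the text."""
--     NAMES = ("Pubkey", "Variant", "Resource")
--     out = []
--     i = 0
--     n = len(text)
--     while i < n:
--         c = text[i]
--         out.append(c)
--         i += 1
--         if c == ' ':
--             for name in NAMES:
--                 if text.startswith(name, i):
--                     out.append('[' + name + ']')
--                     i += len(name)
--                     break
--     return ''.join(out)
-- ===== Notes on version B (the rewrite author's own statement) =====
-- stated objective: alternative
-- what changed: Three sequential full replace passes (one per class name) are replaced by a single left-to-right scan that, after each space, matches the three names at once and inserts the brackets in place.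
import Mathlib
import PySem

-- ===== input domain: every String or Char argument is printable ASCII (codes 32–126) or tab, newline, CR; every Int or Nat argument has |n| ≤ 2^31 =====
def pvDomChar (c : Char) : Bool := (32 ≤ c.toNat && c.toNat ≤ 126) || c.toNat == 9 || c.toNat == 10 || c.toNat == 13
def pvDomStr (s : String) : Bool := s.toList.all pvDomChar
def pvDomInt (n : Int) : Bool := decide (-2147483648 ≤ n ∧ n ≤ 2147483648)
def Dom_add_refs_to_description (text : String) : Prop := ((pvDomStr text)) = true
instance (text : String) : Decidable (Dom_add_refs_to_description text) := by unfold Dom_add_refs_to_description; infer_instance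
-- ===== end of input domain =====

-- B replaces A's three sequential full-text `replace` passes by one left-to-right scan
-- that matches the three class names right after each space (objective: alternative,
-- a single pass instead of three; not measured faster).

-- ===== PORT A =====
def add_refs_to_description (text : String) : String :=
  ["Pubkey", "Variant", "Resource"].foldl
    (fun t ref => PySem.Str.replace t (" " ++ ref) (" [" ++ ref ++ "]")) text

-- ===== PORT B =====
-- the inner `for name in NAMES: if text.startswith(name, i): … break` loop of Source B
def bMatch (t : List Char) : Option (List Char) :=
  if "Pubkey".toList.isPrefixOf t then some "Pubkey".toList
  else if "Variant".toList.isPrefixOf t then some "Variant".toList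
  else if "Resource".toList.isPrefixOf t then some "Resource".toList
  else none

-- the `while i < n` loop of Source B: `acc` is the flattened `out`, the list argument is text[i:]
def bGo (acc : List Char) (l : List Char) : List Char :=
  match l with
  | [] => acc
  | c :: t =>
    if c = ' ' then
      match bMatch t with
      | some name => bGo ((acc ++ [c]) ++ ('[' :: (name ++ [']']))) (t.drop name.length)
      | none => bGo (acc ++ [c]) t
    else bGo (acc ++ [c]) t
termination_by l.length
decreasing_by
  all_goals simp

def add_refs_to_description_alt (text : String) : String :=
  String.ofList (bGo [] text.toList)

-- ===== PRECONDITION & SPEC =====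
def Spec_add_refs_to_description (text : String) (out : String) : Prop := out = add_refs_to_description_alt text
instance (text : String) (out : String) : Decidable (Spec_add_refs_to_description text out) := by unfold Spec_add_refs_to_description; infer_instance

-- ===== CLAIM (what is proved, stated in full; the proofs are below) =====
def Claim_equal_add_refs_to_description : Prop := ∀ (text : String), Dom_add_refs_to_description text → Spec_add_refs_to_description text (add_refs_to_description text)

-- ===== LEMMAS AND PROOFS =====

-- accumulator-free version of one Python `replace` pass (old nonempty)
def repl (old new : List Char) (h : 0 < old.length) (l : List Char) : List Char :=
  match l with
  | [] => []
  | c :: t =>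
    if hp : old.isPrefixOf (c :: t) then new ++ repl old new h (List.drop old.length (c :: t))
    else c :: repl old new h t
termination_by l.length
decreasing_by
  · have hle : old.length ≤ (c :: t).length := (List.isPrefixOf_iff_prefix.mp hp).length_le
    simp at hle ⊢
    omega
  · simp

-- accumulator-free version of B's scan
def scan (l : List Char) : List Char :=
  match l with
  | [] => []
  | c :: t =>
    if c = ' ' then
      match bMatch t with
      | some name => c :: '[' :: (name ++ ']' :: scan (t.drop name.length))
      | none => c :: scan t
    else c :: scan t
termination_by l.length
decreasing_by
  all_goals simp

theorem bGo_eq_scan : ∀ (n : Nat) (l acc : List Char), l.length ≤ n → bGo acc l = acc ++ scan l := by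
  intro n
  induction n with
  | zero =>
    intro l acc h
    have hl : l = [] := by cases l <;> simp_all
    subst hl
    simp [bGo, scan]
  | succ n ih =>
    intro l acc h
    cases l with
    | nil => simp [bGo, scan]
    | cons c t =>
      have ht : t.length ≤ n := by simp at h; omega
      by_cases hc : c = ' '
      · cases hm : bMatch t with
        | some name =>
          rw [bGo, scan]
          simp only [hc, hm]
          rw [ih (t.drop name.length) _ (by simp; omega)]
          simp
        | none =>
          rw [bGo, scan]
          simp only [hc, hm]
          rw [ih t _ ht]
          simp
      · rw [bGo, scan]
        simp only [if_neg hc]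
        rw [ih t _ ht]
        simp

theorem go_eq_repl (old new : List Char) (h : 0 < old.length) :
    ∀ (f : Nat) (l acc : List Char), l.length ≤ f →
      PySem.Chars.replace.go old new f l acc = acc.reverse ++ repl old new h l := by
  intro f
  induction f with
  | zero =>
    intro l acc hl
    have : l = [] := by cases l <;> simp_all
    subst this
    simp [PySem.Chars.replace.go, repl]
  | succ f ih =>
    intro l acc hl
    cases l with
    | nil => simp [PySem.Chars.replace.go, repl]
    | cons c t =>
      rw [PySem.Chars.replace.go]
      by_cases hp : old.isPrefixOf (c :: t)
      · rw [if_pos hp]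
        have hle : old.length ≤ (c :: t).length := (List.isPrefixOf_iff_prefix.mp hp).length_le
        rw [ih _ _ (by simp at hl hle ⊢; omega)]
        rw [repl, dif_pos hp]
        simp
      · rw [if_neg hp]
        rw [ih t _ (by simp at hl; omega)]
        rw [repl, dif_neg hp]
        simp

theorem replace_eq_repl (old new l : List Char) (h : 0 < old.length) :
    PySem.Chars.replace l old new = repl old new h l := by
  have hne : old.isEmpty = false := by cases old <;> simp_all
  rw [PySem.Chars.replace, hne]
  simpa using go_eq_repl old new h l.length l [] le_rfl

theorem repl_cons_ne (os ns : List Char) (h : 0 < (' ' :: os).length) (c : Char) (x : List Char)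
    (hc : c ≠ ' ') : repl (' ' :: os) ns h (c :: x) = c :: repl (' ' :: os) ns h x := by
  have hcond : (' ' :: os).isPrefixOf (c :: x) = false := by
    simp [List.isPrefixOf]
    intro h'
    exact absurd h'.symm hc
  rw [repl, dif_neg (by simp [hcond])]

theorem repl_passes {os ns : List Char} {h : 0 < (' ' :: os).length} {a x : List Char}
    (ha : ∀ ch ∈ a, ch ≠ ' ') : repl (' ' :: os) ns h (a ++ x) = a ++ repl (' ' :: os) ns h x := by
  induction a with
  | nil => simp
  | cons ch a' ih =>
    rw [List.cons_append, repl_cons_ne os ns h ch _ (ha ch (by simp)),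
      ih (fun y hy => ha y (by simp [hy]))]
    simp

theorem repl_match {old ns : List Char} {h : 0 < old.length} (x : List Char) :
    repl old ns h (old ++ x) = ns ++ repl old ns h x := by
  cases old with
  | nil => simp at h
  | cons oc ot =>
    rw [List.cons_append, repl,
      dif_pos (List.isPrefixOf_iff_prefix.mpr ⟨x, by simp⟩)]
    congr 1
    congr 1
    simp

theorem noNewPrefix (os ns : List Char) (h : 0 < (' ' :: os).length) :
    ∀ (q : List Char), (∀ ch ∈ q, ch ≠ ' ') →
      ∀ t, q.isPrefixOf t = false → q.isPrefixOf (repl (' ' :: os) (' ' :: ns) h t) = false := by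
  intro q
  induction q with
  | nil => intro _ t ht; simp [List.isPrefixOf] at ht
  | cons qc qs ih =>
    intro hq t ht
    cases t with
    | nil => simp [repl, List.isPrefixOf]
    | cons c t' =>
      by_cases hp : (' ' :: os).isPrefixOf (c :: t')
      · rw [repl, dif_pos hp]
        have : qc ≠ ' ' := hq qc (by simp)
        simp [List.isPrefixOf, this]
      · rw [repl, dif_neg hp]
        simp only [List.isPrefixOf] at ht ⊢
        by_cases hqc : qc == c
        · simp only [hqc, Bool.true_and] at ht ⊢
          exact ih (fun y hy => hq y (by simp [hy])) t' ht
        · simp [Bool.eq_false_iff.mpr hqc]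

theorem repl_step {os ns : List Char} {h : 0 < (' ' :: os).length} {c : Char} {x : List Char}
    (hne : List.isPrefixOf (' ' :: os) (c :: x) = false) :
    repl (' ' :: os) ns h (c :: x) = c :: repl (' ' :: os) ns h x := by
  rw [repl, dif_neg (by simp [hne])]

-- stepping over the head space when the rest does not match
theorem repl_space_not {os ns : List Char} {h : 0 < (' ' :: os).length} {t : List Char}
    (hn : os.isPrefixOf t = false) :
    repl (' ' :: os) ns h (' ' :: t) = ' ' :: repl (' ' :: os) ns h t := by
  rw [repl, dif_neg (by simp [List.isPrefixOf, hn])]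

-- a pass of a later pattern steps over an already-inserted replacement / a foreign name
theorem skip_V_nP {ns : List Char} {h : 0 < ([' ', 'V', 'a', 'r', 'i', 'a', 'n', 't']).length} (x : List Char) :
    repl [' ', 'V', 'a', 'r', 'i', 'a', 'n', 't'] ns h ([' ', '[', 'P', 'u', 'b', 'k', 'e', 'y', ']'] ++ x) = [' ', '[', 'P', 'u', 'b', 'k', 'e', 'y', ']'] ++ repl [' ', 'V', 'a', 'r', 'i', 'a', 'n', 't'] ns h x := by
  simp only [List.cons_append, List.nil_append]
  repeat rw [repl_step (by simp [List.isPrefixOf])]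

theorem skip_R_nP {ns : List Char} {h : 0 < ([' ', 'R', 'e', 's', 'o', 'u', 'r', 'c', 'e']).length} (x : List Char) :
    repl [' ', 'R', 'e', 's', 'o', 'u', 'r', 'c', 'e'] ns h ([' ', '[', 'P', 'u', 'b', 'k', 'e', 'y', ']'] ++ x) = [' ', '[', 'P', 'u', 'b', 'k', 'e', 'y', ']'] ++ repl [' ', 'R', 'e', 's', 'o', 'u', 'r', 'c', 'e'] ns h x := by
  simp only [List.cons_append, List.nil_append]
  repeat rw [repl_step (by simp [List.isPrefixOf])]

theorem skip_R_nV {ns : List Char} {h : 0 < ([' ', 'R', 'e', 's', 'o', 'u', 'r', 'c', 'e']).length} (x : List Char) :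
    repl [' ', 'R', 'e', 's', 'o', 'u', 'r', 'c', 'e'] ns h ([' ', '[', 'V', 'a', 'r', 'i', 'a', 'n', 't', ']'] ++ x) = [' ', '[', 'V', 'a', 'r', 'i', 'a', 'n', 't', ']'] ++ repl [' ', 'R', 'e', 's', 'o', 'u', 'r', 'c', 'e'] ns h x := by
  simp only [List.cons_append, List.nil_append]
  repeat rw [repl_step (by simp [List.isPrefixOf])]

theorem skip_V_oR {ns : List Char} {h : 0 < ([' ', 'V', 'a', 'r', 'i', 'a', 'n', 't']).length} (x : List Char) :
    repl [' ', 'V', 'a', 'r', 'i', 'a', 'n', 't'] ns h ([' ', 'R', 'e', 's', 'o', 'u', 'r', 'c', 'e'] ++ x) = [' ', 'R', 'e', 's', 'o', 'u', 'r', 'c', 'e'] ++ repl [' ', 'V', 'a', 'r', 'i', 'a', 'n', 't'] ns h x := by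
  simp only [List.cons_append, List.nil_append]
  repeat rw [repl_step (by simp [List.isPrefixOf])]

theorem main_eq : ∀ (n : Nat) (l : List Char), l.length ≤ n →
    repl [' ', 'R', 'e', 's', 'o', 'u', 'r', 'c', 'e'] [' ', '[', 'R', 'e', 's', 'o', 'u', 'r', 'c', 'e', ']'] (by decide)
      (repl [' ', 'V', 'a', 'r', 'i', 'a', 'n', 't'] [' ', '[', 'V', 'a', 'r', 'i', 'a', 'n', 't', ']'] (by decide)
        (repl [' ', 'P', 'u', 'b', 'k', 'e', 'y'] [' ', '[', 'P', 'u', 'b', 'k', 'e', 'y', ']'] (by decide) l)) = scan l := by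
  intro n
  induction n with
  | zero =>
    intro l hl
    have : l = [] := by cases l <;> simp_all
    subst this
    simp [repl, scan]
  | succ n ih =>
    intro l hl
    cases l with
    | nil => simp [repl, scan]
    | cons c t =>
      have ht : t.length ≤ n := by simp at hl; omega
      by_cases hc : c = ' '
      · subst hc
        cases hm : bMatch t with
        | some name =>
          rw [scan, if_pos rfl, hm]
          unfold bMatch at hm
          split_ifs at hm with h1 h2 h3
          · -- Pubkey matches
            have hname : name = "Pubkey".toList := (Option.some.inj hm).symm
            obtain ⟨r, hr⟩ := List.isPrefixOf_iff_prefix.mp h1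
            have hpl : "Pubkey".toList = ['P', 'u', 'b', 'k', 'e', 'y'] := by decide
            rw [hpl] at hname hr
            subst hname
            rw [← hr]
            have hrl : r.length ≤ n := by
              rw [← hr] at ht; simp at ht; omega
            rw [← List.cons_append, repl_match, skip_V_nP, skip_R_nP, ih r hrl]
            simp
          · -- Variant matches
            have hname : name = "Variant".toList := (Option.some.inj hm).symm
            obtain ⟨r, hr⟩ := List.isPrefixOf_iff_prefix.mp h2
            have hvl : "Variant".toList = ['V', 'a', 'r', 'i', 'a', 'n', 't'] := by decide
            rw [hvl] at hname hr
            subst hname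
            rw [← hr]
            have hrl : r.length ≤ n := by
              rw [← hr] at ht; simp at ht; omega
            have hcP : List.isPrefixOf ['P', 'u', 'b', 'k', 'e', 'y']
                (['V', 'a', 'r', 'i', 'a', 'n', 't'] ++ r) = false := by
              apply Bool.eq_false_iff.mpr
              simp [List.cons_prefix_cons]
            have hns : ∀ ch ∈ (['V', 'a', 'r', 'i', 'a', 'n', 't'] : List Char), ch ≠ ' ' := by
              simp
            rw [repl_space_not hcP, repl_passes hns, ← List.cons_append, repl_match,
              skip_R_nV, ih r hrl]
            simp
          · -- Resource matches
            have hname : name = "Resource".toList := (Option.some.inj hm).symm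
            obtain ⟨r, hr⟩ := List.isPrefixOf_iff_prefix.mp h3
            have hrsl : "Resource".toList = ['R', 'e', 's', 'o', 'u', 'r', 'c', 'e'] := by decide
            rw [hrsl] at hname hr
            subst hname
            rw [← hr]
            have hrl : r.length ≤ n := by
              rw [← hr] at ht; simp at ht; omega
            have hcP : List.isPrefixOf ['P', 'u', 'b', 'k', 'e', 'y']
                (['R', 'e', 's', 'o', 'u', 'r', 'c', 'e'] ++ r) = false := by
              apply Bool.eq_false_iff.mpr
              simp [List.cons_prefix_cons]
            have hns : ∀ ch ∈ (['R', 'e', 's', 'o', 'u', 'r', 'c', 'e'] : List Char), ch ≠ ' ' := by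
              simp
            rw [repl_space_not hcP, repl_passes hns, ← List.cons_append, skip_V_oR,
              repl_match, ih r hrl]
            simp
        | none =>
          rw [scan, if_pos rfl, hm]
          unfold bMatch at hm
          split_ifs at hm with h1 h2 h3
          have h1' : List.isPrefixOf ['P', 'u', 'b', 'k', 'e', 'y'] t = false := by
            have e : "Pubkey".toList = ['P', 'u', 'b', 'k', 'e', 'y'] := by decide
            rw [← e]; exact Bool.eq_false_iff.mpr h1
          have h2' : List.isPrefixOf ['V', 'a', 'r', 'i', 'a', 'n', 't'] t = false := by
            have e : "Variant".toList = ['V', 'a', 'r', 'i', 'a', 'n', 't'] := by decide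
            rw [← e]; exact Bool.eq_false_iff.mpr h2
          have h3' : List.isPrefixOf ['R', 'e', 's', 'o', 'u', 'r', 'c', 'e'] t = false := by
            have e : "Resource".toList = ['R', 'e', 's', 'o', 'u', 'r', 'c', 'e'] := by decide
            rw [← e]; exact Bool.eq_false_iff.mpr h3
          have h2'' : List.isPrefixOf ['V', 'a', 'r', 'i', 'a', 'n', 't'] (repl [' ', 'P', 'u', 'b', 'k', 'e', 'y'] [' ', '[', 'P', 'u', 'b', 'k', 'e', 'y', ']'] (by decide) t) = false :=
            noNewPrefix _ _ _ ['V', 'a', 'r', 'i', 'a', 'n', 't'] (by simp) t h2'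
          have h3'' : List.isPrefixOf ['R', 'e', 's', 'o', 'u', 'r', 'c', 'e']
              (repl [' ', 'V', 'a', 'r', 'i', 'a', 'n', 't'] [' ', '[', 'V', 'a', 'r', 'i', 'a', 'n', 't', ']'] (by decide)
                (repl [' ', 'P', 'u', 'b', 'k', 'e', 'y'] [' ', '[', 'P', 'u', 'b', 'k', 'e', 'y', ']'] (by decide) t)) = false :=
            noNewPrefix _ _ _ ['R', 'e', 's', 'o', 'u', 'r', 'c', 'e'] (by simp) _
              (noNewPrefix _ _ _ ['R', 'e', 's', 'o', 'u', 'r', 'c', 'e'] (by simp) t h3')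
          rw [repl_space_not h1', repl_space_not h2'', repl_space_not h3'', ih t ht]
      · rw [scan, if_neg hc]
        rw [repl_cons_ne _ _ _ _ _ hc, repl_cons_ne _ _ _ _ _ hc, repl_cons_ne _ _ _ _ _ hc,
          ih t ht]

-- ===== VERDICT (by name: the statement is the Claim_ definition above) =====
theorem add_refs_to_description_spec : Claim_equal_add_refs_to_description := by
  intro text _
  unfold Spec_add_refs_to_description add_refs_to_description add_refs_to_description_alt
  simp only [List.foldl, PySem.Str.replace]
  have e1 : (" " ++ "Pubkey").toList = [' ', 'P', 'u', 'b', 'k', 'e', 'y'] := by decide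
  have e2 : (" " ++ "Variant").toList = [' ', 'V', 'a', 'r', 'i', 'a', 'n', 't'] := by decide
  have e3 : (" " ++ "Resource").toList = [' ', 'R', 'e', 's', 'o', 'u', 'r', 'c', 'e'] := by decide
  have f1 : (" [" ++ "Pubkey" ++ "]").toList = [' ', '[', 'P', 'u', 'b', 'k', 'e', 'y', ']'] := by decide
  have f2 : (" [" ++ "Variant" ++ "]").toList = [' ', '[', 'V', 'a', 'r', 'i', 'a', 'n', 't', ']'] := by decide
  have f3 : (" [" ++ "Resource" ++ "]").toList = [' ', '[', 'R', 'e', 's', 'o', 'u', 'r', 'c', 'e', ']'] := by decide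
  rw [e1, e2, e3, f1, f2, f3]
  rw [String.toList_ofList, String.toList_ofList]
  rw [replace_eq_repl _ _ _ (by decide), replace_eq_repl _ _ _ (by decide),
    replace_eq_repl _ _ _ (by decide)]
  rw [main_eq text.toList.length _ le_rfl]
  rw [bGo_eq_scan text.toList.length _ [] le_rfl]
  simp
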